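-- pv_equiv track=rewrite | github.com/lovisaviigisalu/AdventOfCode2024 | Day_1/Main.py | part2
-- ===== SOURCE A (Python) =====
-- def part2(a, b):
--     a.sort()
--     b.sort()
--     bigSum = 0
--     for i in range(len(a)):
--         essa=a[i]
--         howMany=0
--         for j in range(0, len(b)):
--             if b[j] == essa:
--                 howMany+=1
--             if b[j] > essa:
--                 break
--         bigSum += howMany * essa
--
--     return bigSum
-- ===== SOURCE B (Python) =====
-- def part2(a, b):
--     a.sort()
--     b.sort()
--     cnt = {}
--     for x in b:
--         cnt[x] = cnt.get(x, 0) + 1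
--     total = 0
--     for x in a:
--         total += cnt.get(x, 0) * x
--     return total
-- ===== Notes on version B (the rewrite author's own statement) =====
-- stated objective: faster
-- what changed: Replaced the per-element scan of b (with early break) by a count dictionary of b built once, then a single pass over a.
import Mathlib
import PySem

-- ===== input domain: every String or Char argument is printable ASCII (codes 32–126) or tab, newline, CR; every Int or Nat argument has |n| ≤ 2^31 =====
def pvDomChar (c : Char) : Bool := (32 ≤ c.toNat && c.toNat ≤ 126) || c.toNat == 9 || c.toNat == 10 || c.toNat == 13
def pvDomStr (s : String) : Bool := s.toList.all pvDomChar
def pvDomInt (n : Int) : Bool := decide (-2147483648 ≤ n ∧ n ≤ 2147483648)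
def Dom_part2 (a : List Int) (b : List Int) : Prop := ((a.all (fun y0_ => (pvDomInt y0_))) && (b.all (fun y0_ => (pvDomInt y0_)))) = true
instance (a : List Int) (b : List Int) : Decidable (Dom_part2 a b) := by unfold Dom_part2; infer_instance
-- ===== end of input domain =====

-- B replaces A's inner scan of b by a count dictionary built once (faster in a timing run).
-- Both A and B sort a and b in place in Python; the claim is about the return value (the mutation is identical).

-- ===== PORT A =====
-- inner loop 'for j in range(0, len(b)): if b[j]==essa: howMany+=1; if b[j]>essa: break'
def part2Count (essa : Int) : List Int → Int → Int
  | [], howMany => howMany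
  | x :: rest, howMany =>
      let howMany' := if x == essa then howMany + 1 else howMany
      if x > essa then howMany' else part2Count essa rest howMany'

def part2 (a : List Int) (b : List Int) : Int :=
  let a' := PySem.List.sorted a id false
  let b' := PySem.List.sorted b id false
  a'.foldl (fun bigSum essa => bigSum + part2Count essa b' 0 * essa) 0

-- ===== PORT B =====
def part2_alt (a : List Int) (b : List Int) : Int :=
  let a' := PySem.List.sorted a id false
  let b' := PySem.List.sorted b id false
  let cnt : PySem.Dict Int Int := b'.foldl (fun d x => d.insert x (d.getD x 0 + 1)) PySem.Dict.empty
  a'.foldl (fun total x => total + cnt.getD x 0 * x) 0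

-- ===== PRECONDITION & SPEC =====
def Spec_part2 (a : List Int) (b : List Int) (out : Int) : Prop := out = part2_alt a b
instance (a : List Int) (b : List Int) (out : Int) : Decidable (Spec_part2 a b out) := by unfold Spec_part2; infer_instance

-- ===== CLAIM (what is proved, stated in full; the proofs are below) =====
def Claim_equal_part2 : Prop := ∀ (a : List Int) (b : List Int), Dom_part2 a b → Spec_part2 a b (part2 a b)

-- ===== LEMMAS AND PROOFS =====

-- On a ≤-sorted list, A's scan-with-break counts exactly the occurrences of essa.
theorem part2Count_eq_count (essa : Int) :
    ∀ (l : List Int), l.Pairwise (· ≤ ·) → ∀ h : Int, part2Count essa l h = h + l.count essa := by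
  intro l hl
  induction l with
  | nil => intro h; simp [part2Count]
  | cons x rest ih =>
    intro h
    have hrest : rest.Pairwise (· ≤ ·) := (List.pairwise_cons.mp hl).2
    have hall : ∀ y ∈ rest, x ≤ y := (List.pairwise_cons.mp hl).1
    by_cases hgt : x > essa
    · have hne : (x == essa) = false := by simp; omega
      have hcnt : rest.count essa = 0 := by
        rw [List.count_eq_zero]
        intro hmem
        have := hall essa hmem
        omega
      simp [part2Count, hne, hgt, List.count_cons, hcnt]
    · have : ¬ x > essa := hgt
      by_cases heq : x = essa
      · simp [part2Count, heq, hgt, ih hrest]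
        omega
      · have hne : (x == essa) = false := by simp [heq]
        simp [part2Count, hne, hgt, ih hrest, heq]

-- The dict built by B's first loop maps v to (base value) + count of v.
theorem getD_fold_insert (v : Int) :
    ∀ (l : List Int) (d : PySem.Dict Int Int),
      (l.foldl (fun d x => d.insert x (d.getD x 0 + 1)) d).getD v 0 = d.getD v 0 + l.count v := by
  intro l
  induction l with
  | nil => intro d; simp
  | cons x rest ih =>
    intro d
    simp only [List.foldl_cons, ih, List.count_cons]
    rw [PySem.Dict.getD_insert]
    by_cases h : v = x
    · simp [h]; omega
    · simp [h]
      have : ¬ (x = v) := fun hx => h hx.symm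
      simp [this]

-- ===== VERDICT (by name: the statement is the Claim_ definition above) =====
theorem part2_spec : Claim_equal_part2 := by
  unfold Claim_equal_part2
  intro a b _
  unfold Spec_part2 part2 part2_alt
  have hb : (PySem.List.sorted b id false).Pairwise (· ≤ ·) := by
    have := PySem.List.sorted_pairwise (xs := b) (key := id)
    simpa using this
  have hfun : ∀ essa : Int,
      part2Count essa (PySem.List.sorted b id false) 0 =
      ((PySem.List.sorted b id false).foldl (fun d x => d.insert x (d.getD x 0 + 1))
        PySem.Dict.empty).getD essa 0 := by
    intro essa
    rw [part2Count_eq_count essa _ hb 0, getD_fold_insert]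
    simp
  simp only [hfun]
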